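-- pv_equiv track=rewrite | github.com/sdsc-ordes/debates-app | backend/src/dataloader/merge.py | get_speakers_from_segments
-- ===== SOURCE A (Python) =====
-- def get_speakers_from_segments(segments):
--     # Extract a unique list of speaker dictionaries
--     seen_speakers = set()
--     unique_speakers = []
--
--     for segment in segments:
--         speaker_id = segment["speaker_id"]
--         if speaker_id not in seen_speakers:
--             seen_speakers.add(speaker_id)
--             unique_speakers.append({"speaker_id": speaker_id})
--     return unique_speakers
-- ===== SOURCE B (Python) =====
-- def get_speakers_from_segments(segments):
--     # Filter-out loop: emit the first id, delete all its later occurrences, repeat.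
--     ids = [segment["speaker_id"] for segment in segments]
--     unique_speakers = []
--     while ids:
--         head = ids[0]
--         unique_speakers.append({"speaker_id": head})
--         ids = [x for x in ids[1:] if x != head]
--     return unique_speakers
-- ===== Notes on version B (the rewrite author's own statement) =====
-- stated objective: alternative
-- what changed: Replaces the seen-set guarded single pass with a filter-out worklist: repeatedly emit the first remaining id and delete every later occurrence of it, so no membership structure is kept; trades the hash set for a quadratic-worst-case rebuild of the worklist.
import Mathlib
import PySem

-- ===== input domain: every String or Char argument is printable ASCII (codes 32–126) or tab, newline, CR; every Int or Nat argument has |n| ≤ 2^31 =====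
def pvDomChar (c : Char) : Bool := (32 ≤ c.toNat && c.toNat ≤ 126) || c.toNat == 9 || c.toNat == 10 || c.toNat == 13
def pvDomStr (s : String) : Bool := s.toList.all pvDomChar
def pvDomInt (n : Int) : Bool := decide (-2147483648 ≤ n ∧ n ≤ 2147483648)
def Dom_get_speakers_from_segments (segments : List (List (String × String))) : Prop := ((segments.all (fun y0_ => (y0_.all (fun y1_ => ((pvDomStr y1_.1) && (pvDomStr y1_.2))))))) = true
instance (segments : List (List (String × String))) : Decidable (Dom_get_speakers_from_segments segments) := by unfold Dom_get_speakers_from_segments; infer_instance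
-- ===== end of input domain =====

-- B replaces A's seen-set guarded pass by a filter-out worklist (emit first id, delete its later
-- occurrences, repeat); return values proved equal on Pre_.

-- ===== PORT A =====
-- segment["speaker_id"]; a missing key is a KeyError (get? = none), excluded by Pre_; getD is only reached with the key present
def pvSid (seg : List (String × String)) : String :=
  ((PySem.Dict.mk seg).get? "speaker_id").getD ""

def get_speakers_from_segments (segments : List (List (String × String))) : List (List (String × String)) :=
  (segments.foldl
    (fun (st : PySem.Set String × List (List (String × String))) seg =>
      let speaker_id := pvSid seg
      if PySem.Set.contains st.1 speaker_id then st
      else (PySem.Set.add st.1 speaker_id, st.2 ++ [[("speaker_id", speaker_id)]]))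
    (PySem.Set.empty, [])).2

-- ===== PORT B =====
-- the while loop: ids shrinks strictly (head removed, rest filtered), so recursion on the worklist
def pvLoop : List String → List (List (String × String))
  | [] => []
  | head :: rest =>
      [("speaker_id", head)] :: pvLoop (rest.filter (fun x => x != head))
termination_by ids => ids.length
decreasing_by
  simp only [List.unattach, List.length_map, List.length_cons]
  exact Nat.lt_succ_of_le (le_trans (List.length_filter_le _ _) (by simp))

def get_speakers_from_segments_alt (segments : List (List (String × String))) : List (List (String × String)) :=
  let ids := segments.map pvSid
  pvLoop ids

-- ===== PRECONDITION & SPEC =====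
-- Pre_ excludes exactly the inputs where some segment lacks the "speaker_id" key: A raises KeyError there.
def Pre_get_speakers_from_segments (segments : List (List (String × String))) : Prop :=
  (segments.all (fun seg => ((PySem.Dict.mk seg).get? "speaker_id").isSome)) = true
instance (segments : List (List (String × String))) : Decidable (Pre_get_speakers_from_segments segments) := by unfold Pre_get_speakers_from_segments; infer_instance

def pvWitness_get_speakers_from_segments : (List (List (String × String))) :=
  [[("speaker_id", "alice")], [("speaker_id", "bob"), ("lang", "en")], [("speaker_id", "alice")]]

def Spec_get_speakers_from_segments (segments : List (List (String × String))) (out : List (List (String × String))) : Prop := out = get_speakers_from_segments_alt segments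
instance (segments : List (List (String × String))) (out : List (List (String × String))) : Decidable (Spec_get_speakers_from_segments segments out) := by unfold Spec_get_speakers_from_segments; infer_instance

-- ===== CLAIM =====
def Claim_equal_get_speakers_from_segments : Prop := ∀ (segments : List (List (String × String))), Dom_get_speakers_from_segments segments → Pre_get_speakers_from_segments segments → Spec_get_speakers_from_segments segments (get_speakers_from_segments segments)

-- ===== LEMMAS AND PROOFS =====
def pvEmit (sid : String) : List (String × String) := [("speaker_id", sid)]

-- loop invariant for A: output list = emitted image of the seen-set
theorem pv_fold_inv (segs : List (List (String × String))) (s : PySem.Set String) :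
    segs.foldl
      (fun (st : PySem.Set String × List (List (String × String))) seg =>
        if PySem.Set.contains st.1 (pvSid seg) then st
        else (PySem.Set.add st.1 (pvSid seg), st.2 ++ [[("speaker_id", pvSid seg)]]))
      (s, s.map pvEmit)
    = (PySem.Set.update s (segs.map pvSid), (PySem.Set.update s (segs.map pvSid)).map pvEmit) := by
  induction segs generalizing s with
  | nil => simp [PySem.Set.update]
  | cons seg rest ih =>
    simp only [List.foldl_cons, List.map_cons]
    have hstep : (if PySem.Set.contains s (pvSid seg) then (s, s.map pvEmit)
        else (PySem.Set.add s (pvSid seg), s.map pvEmit ++ [[("speaker_id", pvSid seg)]]))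
        = (PySem.Set.add s (pvSid seg), (PySem.Set.add s (pvSid seg)).map pvEmit) := by
      by_cases h : PySem.Set.contains s (pvSid seg) = true
      · simp only [if_pos h, PySem.Set.add]
      · simp only [if_neg h, PySem.Set.add, pvEmit, List.map_append, List.map_cons, List.map_nil]
    rw [hstep, ih]
    simp [PySem.Set.update]

theorem pv_portA_eq (segments : List (List (String × String))) :
    get_speakers_from_segments segments
      = (PySem.Set.ofList (segments.map pvSid)).map pvEmit := by
  show (segments.foldl
      (fun (st : PySem.Set String × List (List (String × String))) seg =>
        if PySem.Set.contains st.1 (pvSid seg) then st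
        else (PySem.Set.add st.1 (pvSid seg), st.2 ++ [[("speaker_id", pvSid seg)]]))
      (([] : PySem.Set String), List.map pvEmit [])).2 = _
  rw [pv_fold_inv]
  rfl

-- filtering out an element commutes with ordered dedup (Set.discard is definitionally this filter)
theorem pv_filter_ofList (l : List String) (x : String) :
    (PySem.Set.ofList l).filter (fun y => y != x) = PySem.Set.ofList (l.filter (fun y => y != x)) := by
  induction l with
  | nil => rfl
  | cons y l ih =>
    have hcons : ∀ (m : List String) (z : String),
        PySem.Set.ofList (z :: m) = z :: (PySem.Set.ofList m).filter (fun a => a != z) := by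
      intro m z; rw [PySem.Set.ofList_cons]; rfl
    by_cases h : y = x
    · subst h
      rw [hcons]
      simp only [List.filter_cons, bne_self_eq_false, Bool.false_eq_true, if_false,
        List.filter_filter, Bool.and_self]
      exact ih
    · have hb : (y != x) = true := by simp [h]
      rw [hcons, List.filter_cons, if_pos hb, List.filter_cons, if_pos hb, hcons, ← ih]
      simp only [List.filter_filter]
      exact congrArg _ (List.filter_congr (fun a _ => Bool.and_comm _ _))

-- pvLoop computes the ordered dedup of its worklist (strong induction on the worklist length)
theorem pv_pvLoop_eq_aux : ∀ (n : Nat) (ids : List String), ids.length ≤ n →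
    pvLoop ids = (PySem.Set.ofList ids).map pvEmit := by
  intro n
  induction n with
  | zero =>
    intro ids h
    have : ids = [] := List.eq_nil_of_length_eq_zero (Nat.le_zero.mp h)
    subst this; rw [pvLoop]; rfl
  | succ n ih =>
    intro ids h
    match ids with
    | [] => rw [pvLoop]; rfl
    | head :: rest =>
      rw [pvLoop, ih (rest.filter (fun x => x != head))
            (le_trans (List.length_filter_le _ _) (Nat.le_of_succ_le_succ h))]
      rw [← pv_filter_ofList, PySem.Set.ofList_cons]
      rfl

theorem pv_pvLoop_eq (ids : List String) :
    pvLoop ids = (PySem.Set.ofList ids).map pvEmit :=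
  pv_pvLoop_eq_aux ids.length ids (Nat.le_refl _)

-- ===== VERDICT =====
theorem get_speakers_from_segments_spec : Claim_equal_get_speakers_from_segments := by
  intro segments _ _
  show get_speakers_from_segments segments = get_speakers_from_segments_alt segments
  rw [pv_portA_eq]
  show _ = pvLoop (segments.map pvSid)
  rw [pv_pvLoop_eq]
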